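-- pv_equiv track=rewrite | github.com/patrickfrey/strusWikipediaSearch | scripts/strusnlp.py | getMaxSexCount
-- ===== SOURCE A (Python) =====
-- def getMaxSexCount( sexCountMap):
--     rt = None
--     max = 0
--     values = []
--     for sex,cnt in sexCountMap.items():
--         values.append( cnt)
--         if cnt > max:
--             max = cnt
--             rt = sex
--     values.sort( reverse=True)
--     if len(values) >= 2 and values[0] <= values[1] * 2:
--         return None
--     if len(values) >= 1 and values[0] <= 2.0:
--         return None
--     return rt
-- ===== SOURCE B (Python) =====
-- def getMaxSexCount(sexCountMap):
--     rt = None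
--     first = None
--     second = None
--     for sex, cnt in sexCountMap.items():
--         if first is None:
--             rt = sex
--             first = cnt
--         elif cnt > first:
--             rt = sex
--             second = first
--             first = cnt
--         elif second is None or cnt > second:
--             second = cnt
--     if first is None:
--         return None
--     if second is not None and first <= second * 2:
--         return None
--     if first <= 2:
--         return None
--     return rt
-- ===== Notes on version B (the rewrite author's own statement) =====
-- stated objective: faster
-- what changed: B drops A's collected value list and descending sort entirely, tracking the largest and second-largest count (and the argmax key) in a single pass and applying the same dominance guards to those two values.
import Mathlib
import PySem

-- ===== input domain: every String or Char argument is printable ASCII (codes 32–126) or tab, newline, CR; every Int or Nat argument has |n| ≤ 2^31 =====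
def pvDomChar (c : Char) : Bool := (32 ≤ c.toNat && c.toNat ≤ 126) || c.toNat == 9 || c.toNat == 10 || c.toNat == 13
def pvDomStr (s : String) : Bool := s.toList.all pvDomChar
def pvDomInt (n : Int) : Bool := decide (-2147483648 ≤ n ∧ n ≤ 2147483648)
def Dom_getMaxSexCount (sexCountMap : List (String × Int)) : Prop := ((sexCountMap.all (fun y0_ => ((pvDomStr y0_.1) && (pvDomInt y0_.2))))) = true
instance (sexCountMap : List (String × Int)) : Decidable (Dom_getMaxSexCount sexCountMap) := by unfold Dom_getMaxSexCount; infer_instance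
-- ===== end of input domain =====

-- B replaces A's collected-then-sorted value list by a single pass that tracks the two
-- largest counts (objective: a different, sort-free algorithm).

-- ===== PORT A =====
-- loop body of A: append cnt to values; on a strict new max record the sex
def pvLoopA (st : Option String × Int × List Int) (p : String × Int) :
    Option String × Int × List Int :=
  let values := st.2.2 ++ [p.2]
  if p.2 > st.2.1 then (some p.1, p.2, values) else (st.1, st.2.1, values)

def getMaxSexCount (sexCountMap : List (String × Int)) : Option String :=
  let st := sexCountMap.foldl pvLoopA (none, 0, [])
  let values := PySem.List.sorted st.2.2 (fun x => x) true
  -- values[0]/values[1] are only read under the length guards, so getD is exact here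
  if 2 ≤ values.length ∧ values.getD 0 0 ≤ values.getD 1 0 * 2 then none
  else if 1 ≤ values.length ∧ values.getD 0 0 ≤ 2 then none
  else st.1

-- ===== PORT B =====
-- loop body of B: maintain (rt, first, second) = (first argmax key, largest count, second largest)
def pvLoopB (st : Option String × Option Int × Option Int) (p : String × Int) :
    Option String × Option Int × Option Int :=
  match st.2.1 with
  | none => (some p.1, some p.2, st.2.2)
  | some f =>
    if p.2 > f then (some p.1, some p.2, some f)
    else
      match st.2.2 with
      | none => (st.1, some f, some p.2)
      | some sc => if p.2 > sc then (st.1, some f, some p.2) else (st.1, some f, some sc)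

def getMaxSexCount_alt (sexCountMap : List (String × Int)) : Option String :=
  let st := sexCountMap.foldl pvLoopB (none, none, none)
  match st.2.1 with
  | none => none
  | some f =>
    if (match st.2.2 with | some sc => decide (f ≤ sc * 2) | none => false) then none
    else if f ≤ 2 then none
    else st.1

-- ===== PRECONDITION & SPEC =====
def Spec_getMaxSexCount (sexCountMap : List (String × Int)) (out : Option String) : Prop := out = getMaxSexCount_alt sexCountMap
instance (sexCountMap : List (String × Int)) (out : Option String) : Decidable (Spec_getMaxSexCount sexCountMap out) := by unfold Spec_getMaxSexCount; infer_instance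

-- ===== CLAIM (what is proved, stated in full; the proofs are below) =====
def Claim_equal_getMaxSexCount : Prop := ∀ (sexCountMap : List (String × Int)), Dom_getMaxSexCount sexCountMap → Spec_getMaxSexCount sexCountMap (getMaxSexCount sexCountMap)

-- ===== LEMMAS AND PROOFS =====

-- maximum of a list of counts, as an option
def pvMaxO (V : List Int) : Option Int :=
  V.foldl (fun acc c => match acc with | none => some c | some m => some (max m c)) none

-- (largest, second largest) of a multiset of counts
def pvFS (V : List Int) : Option Int × Option Int :=
  (pvMaxO V, (pvMaxO V).bind fun f => pvMaxO (V.erase f))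

theorem pvMaxO_snoc (V : List Int) (c : Int) :
    pvMaxO (V ++ [c]) = match pvMaxO V with | none => some c | some m => some (max m c) := by
  rw [pvMaxO, pvMaxO, List.foldl_append]
  rfl

theorem pvMaxO_none (V : List Int) : pvMaxO V = none ↔ V = [] := by
  induction V using List.reverseRecOn with
  | nil => simp [pvMaxO]
  | append_singleton V c _ =>
    rw [pvMaxO_snoc]
    rcases h : pvMaxO V with _ | m <;> simp

theorem pvMaxO_spec (V : List Int) : ∀ m : Int, pvMaxO V = some m → m ∈ V ∧ ∀ x ∈ V, x ≤ m := by
  induction V using List.reverseRecOn with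
  | nil => intro m h; simp [pvMaxO] at h
  | append_singleton V c ih =>
    intro m h
    rw [pvMaxO_snoc] at h
    rcases h2 : pvMaxO V with _ | m'
    · rw [h2] at h
      simp only [Option.some.injEq] at h
      subst h
      have hV : V = [] := (pvMaxO_none V).mp h2
      subst hV
      simp
    · rw [h2] at h
      simp only [Option.some.injEq] at h
      subst h
      obtain ⟨hm, hall⟩ := ih m' h2
      constructor
      · rcases le_or_gt c m' with hle | hgt
        · have : max m' c = m' := max_eq_left hle
          rw [this]; exact List.mem_append_left _ hm
        · have : max m' c = c := max_eq_right (le_of_lt hgt)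
          rw [this]; simp
      · intro x hx
        rcases List.mem_append.mp hx with hx | hx
        · have := hall x hx
          have := le_max_left m' c
          omega
        · simp at hx
          have := le_max_right m' c
          omega

theorem pvMaxO_eq_of {V : List Int} {m : Int} (hm : m ∈ V) (hall : ∀ x ∈ V, x ≤ m) :
    pvMaxO V = some m := by
  rcases h : pvMaxO V with _ | m'
  · rw [pvMaxO_none] at h
    subst h
    simp at hm
  · obtain ⟨hm', hall'⟩ := pvMaxO_spec V m' h
    have h1 := hall m' hm'
    have h2 := hall' m hm
    have : m' = m := le_antisymm h1 h2
    rw [this]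

theorem pvMaxO_perm {V₁ V₂ : List Int} (h : V₁.Perm V₂) : pvMaxO V₁ = pvMaxO V₂ := by
  rcases h1 : pvMaxO V₁ with _ | m
  · rw [pvMaxO_none] at h1
    subst h1
    have : V₂ = [] := h.symm.eq_nil
    subst this
    rfl
  · obtain ⟨hm, hall⟩ := pvMaxO_spec _ _ h1
    exact (pvMaxO_eq_of (h.mem_iff.mp hm) fun x hx => hall x (h.mem_iff.mpr hx)).symm

theorem pvFS_snoc (V : List Int) (c : Int) :
    pvFS (V ++ [c]) =
      (match pvFS V with
       | (none, _) => (some c, none)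
       | (some f, none) => if c > f then (some c, some f) else (some f, some c)
       | (some f, some sc) =>
         if c > f then (some c, some f)
         else if c > sc then (some f, some c) else (some f, some sc)) := by
  rcases hV : pvMaxO V with _ | f
  · have hnil : V = [] := (pvMaxO_none V).mp hV
    subst hnil
    simp [pvFS, pvMaxO, List.foldl]
  · obtain ⟨hfm, hfle⟩ := pvMaxO_spec V f hV
    by_cases hcf : c > f
    · have hcnot : c ∉ V := fun hc => absurd (hfle c hc) (by omega)
      have h1 : pvMaxO (V ++ [c]) = some c := by
        rw [pvMaxO_snoc, hV]
        have : max f c = c := max_eq_right (le_of_lt hcf)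
        simp [this]
      have h2 : (V ++ [c]).erase c = V := by
        rw [List.erase_append_right _ hcnot]
        simp
      simp only [pvFS, h1, h2, hV, Option.bind_some]
      rcases h3 : pvMaxO (V.erase f) with _ | sc <;> simp [hcf]
    · have h1 : pvMaxO (V ++ [c]) = some f := by
        rw [pvMaxO_snoc, hV]
        have : max f c = f := max_eq_left (by omega)
        simp [this]
      have h2 : (V ++ [c]).erase f = V.erase f ++ [c] := List.erase_append_left _ hfm
      simp only [pvFS, h1, h2, hV, Option.bind_some]
      rw [pvMaxO_snoc]
      rcases h3 : pvMaxO (V.erase f) with _ | sc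
      · simp [hcf]
      · by_cases hcs : c > sc
        · have hmcs : max sc c = c := max_eq_right (le_of_lt hcs)
          simp [hcf, hcs, hmcs]
        · have hmcs : max sc c = sc := max_eq_left (by omega)
          simp [hcf, hcs, hmcs]

-- the two tracked values are exactly the first two entries of A's descending sort
theorem pvFS_sorted (V : List Int) :
    pvFS V = ((PySem.List.sorted V (fun x => x) true).head?,
              (PySem.List.sorted V (fun x => x) true).tail.head?) := by
  have hperm : (PySem.List.sorted V (fun x => x) true).Perm V := PySem.List.sorted_perm V _ _
  have hpw : (PySem.List.sorted V (fun x => x) true).Pairwise (fun a b => b ≤ a) :=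
    PySem.List.sorted_pairwise_rev V _
  rcases hs : PySem.List.sorted V (fun x => x) true with _ | ⟨a, t⟩
  · rw [hs] at hperm
    have : V = [] := hperm.symm.eq_nil
    subst this
    rfl
  · rw [hs] at hperm hpw
    have hta : ∀ x ∈ t, x ≤ a := (List.pairwise_cons.mp hpw).1
    have hmax : pvMaxO V = some a := by
      apply pvMaxO_eq_of (hperm.mem_iff.mp (by simp))
      intro x hx
      rcases List.mem_cons.mp (hperm.mem_iff.mpr hx) with h | h
      · omega
      · exact hta x h
    have heperm : (V.erase a).Perm t := by
      have h := hperm.symm.erase a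
      simpa using h
    have hem : pvMaxO (V.erase a) = pvMaxO t := pvMaxO_perm heperm
    rcases ht : t with _ | ⟨b, t'⟩
    · subst ht
      simp only [pvFS, hmax, Option.bind_some, hem]
      rfl
    · have htpw : (b :: t').Pairwise (fun x y => y ≤ x) := by
        rw [ht] at hpw
        exact (List.pairwise_cons.mp hpw).2
      have htb : pvMaxO t = some b := by
        rw [ht]
        apply pvMaxO_eq_of (by simp)
        intro x hx
        rcases List.mem_cons.mp hx with h | h
        · omega
        · exact (List.pairwise_cons.mp htpw).1 x h
      simp [pvFS, hmax, hem, htb]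

-- the joint loop invariant of A's fold and B's fold
theorem pvInv (l : List (String × Int)) :
    (l.foldl pvLoopA (none, 0, [])).2.2 = l.map Prod.snd ∧
    ((l.foldl pvLoopB (none, none, none)).2.1, (l.foldl pvLoopB (none, none, none)).2.2)
      = pvFS (l.map Prod.snd) ∧
    (l.foldl pvLoopA (none, 0, [])).2.1
      = max 0 (((l.foldl pvLoopB (none, none, none)).2.1).getD 0) ∧
    (0 < (l.foldl pvLoopA (none, 0, [])).2.1 →
      (l.foldl pvLoopA (none, 0, [])).1 = (l.foldl pvLoopB (none, none, none)).1) := by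
  induction l using List.reverseRecOn with
  | nil => refine ⟨rfl, rfl, by simp, by simp⟩
  | append_singleton l p ih =>
    obtain ⟨hv, hfs, hmx, hrt⟩ := ih
    rcases hA : l.foldl pvLoopA (none, 0, []) with ⟨rtA, mxA, vA⟩
    rcases hB : l.foldl pvLoopB (none, none, none) with ⟨rtB, fB, sB⟩
    rw [hA] at hv hmx hrt
    rw [hB] at hfs hmx hrt
    simp only at hv hfs hmx hrt
    rw [List.foldl_append, List.foldl_append, hA, hB]
    simp only [List.foldl_cons, List.foldl_nil, List.map_append, List.map_cons, List.map_nil]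
    rw [pvFS_snoc, ← hfs]
    rcases fB with _ | f
    · -- nothing seen yet: the list so far is empty
      have hVnil : List.map Prod.snd l = [] := by
        have h1 : (none : Option Int) = pvMaxO (List.map Prod.snd l) := congrArg Prod.fst hfs
        exact (pvMaxO_none _).mp h1.symm
      have hsB : sB = none := by
        have h2 := congrArg Prod.snd hfs
        rw [hVnil] at h2
        simpa [pvFS, pvMaxO] using h2
      subst hsB
      have hmx0 : mxA = 0 := by simpa using hmx
      subst hmx0
      refine ⟨by simp only [pvLoopA]; split <;> simp [hv], ?_, ?_, ?_⟩
      · simp [pvLoopB]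
      · simp only [pvLoopA, pvLoopB]
        split_ifs with h <;> simp <;> omega
      · intro hpos
        simp only [pvLoopA, pvLoopB] at hpos ⊢
        by_cases h : p.2 > 0
        · simp [h]
        · rw [if_neg h] at hpos
          simp at hpos
    · have hmxf : mxA = max 0 f := by simpa using hmx
      subst hmxf
      refine ⟨by simp only [pvLoopA]; split <;> simp [hv], ?_, ?_, ?_⟩
      · simp only [pvLoopB]
        by_cases hcf : p.2 > f
        · rcases sB with _ | sc <;> simp [hcf]
        · rcases sB with _ | sc
          · simp [hcf]
          · by_cases hcs : p.2 > sc <;> simp [hcf, hcs]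
      · simp only [pvLoopA, pvLoopB]
        by_cases hcf : p.2 > f
        · by_cases hc0 : p.2 > max 0 f
          · simp [hcf, hc0]; omega
          · simp [hcf, hc0]; omega
        · have hc0 : ¬ p.2 > max 0 f := by omega
          rcases sB with _ | sc
          · simp [hcf, hc0]
          · by_cases hcs : p.2 > sc <;> simp [hcf, hcs, hc0]
      · intro hpos
        simp only [pvLoopA, pvLoopB] at hpos ⊢
        by_cases hcf : p.2 > f
        · by_cases hc0 : p.2 > max 0 f
          · simp [hcf, hc0]
          · rw [if_neg hc0] at hpos
            simp at hpos
            omega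
        · have hc0 : ¬ p.2 > max 0 f := by omega
          rw [if_neg hc0] at hpos
          simp at hpos
          have hr := hrt (by omega)
          rcases sB with _ | sc
          · simp [hcf, hc0, hr]
          · by_cases hcs : p.2 > sc <;> simp [hcf, hcs, hc0, hr]

-- ===== VERDICT (by name: the statement is the Claim_ definition above) =====
theorem getMaxSexCount_spec : Claim_equal_getMaxSexCount := by
  intro m _
  unfold Spec_getMaxSexCount
  obtain ⟨hv, hfs, hmx, hrt⟩ := pvInv m
  rcases hA : m.foldl pvLoopA (none, 0, []) with ⟨rtA, mxA, vA⟩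
  rcases hB : m.foldl pvLoopB (none, none, none) with ⟨rtB, fB, sB⟩
  rw [hA] at hv hmx hrt
  rw [hB] at hfs hmx hrt
  simp only at hv hfs hmx hrt
  simp only [getMaxSexCount, getMaxSexCount_alt]
  rw [hA, hB]
  simp only
  rw [← hv] at hfs
  have hkey := hfs.trans (pvFS_sorted _)
  rcases hs : PySem.List.sorted (vA) (fun x => x) true with _ | ⟨a, t⟩
  · rw [hs] at hkey
    simp only [List.head?, List.tail, Prod.mk.injEq] at hkey
    obtain ⟨rfl, rfl⟩ := hkey
    have hVnil : vA = [] := ((PySem.List.sorted_eq_nil_iff vA (fun x => x) true).mp hs)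
    have hmnil : m = [] := List.map_eq_nil_iff.mp (by rw [← hv, hVnil])
    subst hmnil
    simp only [List.foldl_nil, Prod.mk.injEq] at hA
    obtain ⟨rfl, -, -⟩ := hA
    simp
  · rw [hs] at hkey
    rcases ht : t with _ | ⟨b, t'⟩
    · rw [ht] at hs hkey
      simp only [List.head?, List.tail, Prod.mk.injEq] at hkey
      obtain ⟨rfl, rfl⟩ := hkey
      by_cases h2 : a ≤ 2
      · simp [h2]
      · have hpos : (0:Int) < mxA := by rw [hmx]; simp; omega
        simp [h2, hrt hpos]
    · rw [ht] at hs hkey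
      simp only [List.head?, List.tail, Prod.mk.injEq] at hkey
      obtain ⟨rfl, rfl⟩ := hkey
      by_cases h1 : a ≤ b * 2
      · simp [List.getD, h1]
      · by_cases h2 : a ≤ 2
        · simp [List.getD, h1, h2]
        · have hpos : (0:Int) < mxA := by rw [hmx]; simp; omega
          simp [List.getD, h1, h2, hrt hpos]
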